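-- pv_equiv track=rewrite | github.com/matjmiles/healthcare-job-organizer | hc_jobs_pipeline/enhanced_qualifications.py | _format_qualifications
-- ===== SOURCE A (Python) =====
-- from typing import List, Dict, Tuple, Optional
--
-- def _format_qualifications(qualifications: List[str]) -> str:
--     """Format qualifications list into a readable string with education first."""
--     if not qualifications:
--         return "N/A"
--
--     # Separate education/certification from other qualifications
--     education_quals = []
--     experience_quals = []
--     skill_quals = []
--     other_quals = []
--
--     for qual in qualifications:
--         qual_lower = qual.lower()
--
--         if any(keyword in qual_lower for keyword in ['bachelor', 'degree', 'master', 'associate', 'certification', 'certificate', 'license', 'diploma', 'education']):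
--             education_quals.append(qual)
--         elif any(keyword in qual_lower for keyword in ['experience', 'years', 'background', 'history', 'previous', 'prior']):
--             experience_quals.append(qual)
--         elif any(keyword in qual_lower for keyword in ['skills', 'ability', 'knowledge', 'proficient', 'familiar', 'understanding']):
--             skill_quals.append(qual)
--         else:
--             other_quals.append(qual)
--
--     # Format with priorities: Education -> Experience -> Skills -> Other
--     formatted_parts = []
--
--     if education_quals:
--         formatted_parts.extend(education_quals)
--     if experience_quals:
--         formatted_parts.extend(experience_quals)
--     if skill_quals:
--         formatted_parts.extend(skill_quals)
--     if other_quals: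
--         formatted_parts.extend(other_quals)
--
--     # Join with bullet points and clean up - use \r\n for Excel compatibility
--     result = '\r\n\r\n• '.join(formatted_parts)
--     if result and not result.startswith('•'):
--         result = '• ' + result
--
--     return result
-- ===== SOURCE B (Python) =====
-- from typing import List
--
-- def _rank(qual: str) -> int:
--     ql = qual.lower()
--     if any(k in ql for k in ['bachelor', 'degree', 'master', 'associate', 'certification', 'certificate', 'license', 'diploma', 'education']):
--         return 0
--     if any(k in ql for k in ['experience', 'years', 'background', 'history', 'previous', 'prior']):
--         return 1
--     if any(k in ql for k in ['skills', 'ability', 'knowledge', 'proficient', 'familiar', 'understanding']):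
--         return 2
--     return 3
--
-- def _format_qualifications(qualifications: List[str]) -> str:
--     if not qualifications:
--         return "N/A"
--     result = '\r\n\r\n• '.join(sorted(qualifications, key=_rank))
--     if result and not result.startswith('•'):
--         result = '• ' + result
--     return result
-- ===== Notes on version B (the rewrite author's own statement) =====
-- stated objective: alternative
-- what changed: Replaces A's single pass that appends into four explicit category buckets (then concatenates them) by a rank helper (0-3, same keyword lists, same elif precedence) and one stable sort, sorted(qualifications, key=rank), relying on sort stability to keep original order within each category; the N/A guard and join/bullet formatting are unchanged.
import Mathlib
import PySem

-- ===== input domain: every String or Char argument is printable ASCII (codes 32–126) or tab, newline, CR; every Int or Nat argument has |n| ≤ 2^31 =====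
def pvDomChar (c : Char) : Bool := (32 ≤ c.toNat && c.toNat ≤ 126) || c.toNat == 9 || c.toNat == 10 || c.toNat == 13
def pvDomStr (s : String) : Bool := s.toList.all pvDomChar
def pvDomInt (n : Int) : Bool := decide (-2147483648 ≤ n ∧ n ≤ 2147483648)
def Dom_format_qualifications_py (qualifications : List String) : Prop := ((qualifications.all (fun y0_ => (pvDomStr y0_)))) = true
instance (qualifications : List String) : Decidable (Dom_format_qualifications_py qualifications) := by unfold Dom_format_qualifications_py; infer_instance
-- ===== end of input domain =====

-- B replaces A's single pass with four mutable buckets by a rank helper plus one stable sort (sorted(xs, key=rank)); same return value, similar cost (objective: alternative).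

-- ===== PORT A =====
-- the three keyword lists (shared literals of both Pythons)
def pvKwEdu : List String := ["bachelor", "degree", "master", "associate", "certification", "certificate", "license", "diploma", "education"]
def pvKwExp : List String := ["experience", "years", "background", "history", "previous", "prior"]
def pvKwSkill : List String := ["skills", "ability", "knowledge", "proficient", "familiar", "understanding"]

-- one step of A's for-loop: append qual to the bucket of the first matching keyword list
def pvStepA (st : List String × List String × List String × List String) (qual : String) :
    List String × List String × List String × List String :=
  let ql := PySem.Str.lower qual
  if pvKwEdu.any (fun k => PySem.Str.isIn k ql) then (st.1 ++ [qual], st.2.1, st.2.2.1, st.2.2.2)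
  else if pvKwExp.any (fun k => PySem.Str.isIn k ql) then (st.1, st.2.1 ++ [qual], st.2.2.1, st.2.2.2)
  else if pvKwSkill.any (fun k => PySem.Str.isIn k ql) then (st.1, st.2.1, st.2.2.1 ++ [qual], st.2.2.2)
  else (st.1, st.2.1, st.2.2.1, st.2.2.2 ++ [qual])

-- the four 'if bucket: formatted_parts.extend(bucket)' statements
def pvPartsA (st : List String × List String × List String × List String) : List String :=
  let parts : List String := []
  let parts := if st.1 ≠ [] then parts ++ st.1 else parts
  let parts := if st.2.1 ≠ [] then parts ++ st.2.1 else parts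
  let parts := if st.2.2.1 ≠ [] then parts ++ st.2.2.1 else parts
  if st.2.2.2 ≠ [] then parts ++ st.2.2.2 else parts

def format_qualifications_py (qualifications : List String) : String :=
  if qualifications = [] then "N/A"
  else
    let result := PySem.Str.join "\r\n\r\n• " (pvPartsA (qualifications.foldl pvStepA ([], [], [], [])))
    if result ≠ "" ∧ PySem.Str.startswith result "•" = false then "• " ++ result else result

-- ===== PORT B =====
-- Source B's _rank: priority 0–3 by the same keyword lists, first match wins
def pvRank (qual : String) : Int :=
  let ql := PySem.Str.lower qual
  if pvKwEdu.any (fun k => PySem.Str.isIn k ql) then 0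
  else if pvKwExp.any (fun k => PySem.Str.isIn k ql) then 1
  else if pvKwSkill.any (fun k => PySem.Str.isIn k ql) then 2
  else 3

def format_qualifications_py_alt (qualifications : List String) : String :=
  if qualifications = [] then "N/A"
  else
    let result := PySem.Str.join "\r\n\r\n• " (PySem.List.sorted qualifications pvRank false)
    if result ≠ "" ∧ PySem.Str.startswith result "•" = false then "• " ++ result else result

-- ===== PRECONDITION & SPEC =====
def Spec_format_qualifications_py (qualifications : List String) (out : String) : Prop := out = format_qualifications_py_alt qualifications
instance (qualifications : List String) (out : String) : Decidable (Spec_format_qualifications_py qualifications out) := by unfold Spec_format_qualifications_py; infer_instance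

-- ===== CLAIM (what is proved, stated in full; the proofs are below) =====
def Claim_equal_format_qualifications_py : Prop := ∀ (qualifications : List String), Dom_format_qualifications_py qualifications → Spec_format_qualifications_py qualifications (format_qualifications_py qualifications)

-- ===== LEMMAS AND PROOFS =====

-- the four rank buckets of a list, in order
def pvBuckets (xs : List String) : List String :=
  xs.filter (fun q => pvRank q == 0) ++ xs.filter (fun q => pvRank q == 1) ++
  xs.filter (fun q => pvRank q == 2) ++ xs.filter (fun q => pvRank q == 3)

lemma pvStepA_rank (st : List String × List String × List String × List String) (x : String) :
    pvStepA st x =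
      (st.1 ++ (if pvRank x = 0 then [x] else []), st.2.1 ++ (if pvRank x = 1 then [x] else []),
       st.2.2.1 ++ (if pvRank x = 2 then [x] else []), st.2.2.2 ++ (if pvRank x = 3 then [x] else [])) := by
  simp only [pvStepA, pvRank]
  split_ifs <;> simp_all

lemma pvRank_cases (q : String) : pvRank q = 0 ∨ pvRank q = 1 ∨ pvRank q = 2 ∨ pvRank q = 3 := by
  simp only [pvRank]; split_ifs <;> simp

lemma pvFoldA_eq (xs : List String) : ∀ e ex sk ot,
    xs.foldl pvStepA (e, ex, sk, ot) =
      (e ++ xs.filter (fun q => pvRank q == 0), ex ++ xs.filter (fun q => pvRank q == 1),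
       sk ++ xs.filter (fun q => pvRank q == 2), ot ++ xs.filter (fun q => pvRank q == 3)) := by
  induction xs with
  | nil => simp
  | cons x xs ih =>
    intro e ex sk ot
    rw [List.foldl_cons, pvStepA_rank, ih]
    rcases pvRank_cases x with h | h | h | h <;> simp [h]

lemma pvPartsA_eq (a b c d : List String) : pvPartsA (a, b, c, d) = a ++ b ++ c ++ d := by
  unfold pvPartsA
  by_cases ha : a = [] <;> by_cases hb : b = [] <;> by_cases hc : c = [] <;> by_cases hd : d = [] <;>
    simp [ha, hb, hc, hd]

-- insertBy skips a prefix it does not go before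
lemma pvInsertBy_append (before : String → String → Bool) (x : String) (p q : List String)
    (hp : ∀ y ∈ p, before x y = false) :
    PySem.List.insertBy before x (p ++ q) = p ++ PySem.List.insertBy before x q := by
  induction p with
  | nil => simp
  | cons a p ih =>
    have ha : before x a = false := hp a (by simp)
    simp only [List.cons_append, PySem.List.insertBy, ha]
    simp [ih (fun y hy => hp y (by simp [hy]))]

-- inserting x into the bucket concatenation of ps appends x to the end of its bucket
lemma pvInsert_buckets (x : String) (ps : List String) :
    PySem.List.insertBy (fun a b => decide (pvRank a < pvRank b)) x (pvBuckets ps) =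
      pvBuckets (ps ++ [x]) := by
  have hmem : ∀ (i : Int), ∀ y ∈ ps.filter (fun q => pvRank q == i), pvRank y = i := by
    intro i y hy
    have := List.of_mem_filter hy
    simpa using this
  have hfx : ∀ (i : Int), (List.filter (fun q => pvRank q == i) [x]) = if pvRank x = i then [x] else [] := by
    intro i; by_cases h : pvRank x = i <;> simp [h]
  have happ : ∀ (i : Int) (l : List String), (l ++ [x]).filter (fun q => pvRank q == i) =
      l.filter (fun q => pvRank q == i) ++ (if pvRank x = i then [x] else []) := by
    intro i l; rw [List.filter_append, hfx]
  have hnotbefore : ∀ (i : Int), i ≤ pvRank x → ∀ y ∈ ps.filter (fun q => pvRank q == i),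
      (fun a b => decide (pvRank a < pvRank b)) x y = false := by
    intro i hi y hy
    have := hmem i y hy
    simp only [this, decide_eq_false_iff_not, not_lt]
    omega
  have hbefore : ∀ (i : Int), pvRank x < i → ∀ y ∈ ps.filter (fun q => pvRank q == i),
      (fun a b => decide (pvRank a < pvRank b)) x y = true := by
    intro i hi y hy
    have := hmem i y hy
    simp only [this, decide_eq_true_eq]
    omega
  -- head insertion: x goes before the whole remaining tail
  have hins_front : ∀ (q : List String), (∀ y ∈ q, (fun a b => decide (pvRank a < pvRank b)) x y = true) →
      PySem.List.insertBy (fun a b => decide (pvRank a < pvRank b)) x q = x :: q := by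
    intro q hq
    cases q with
    | nil => rfl
    | cons a q => simp [PySem.List.insertBy, hq a (by simp)]
  rcases pvRank_cases x with h | h | h | h
  · -- rank 0 : skip bucket 0, insert before buckets 1,2,3
    unfold pvBuckets
    rw [List.append_assoc, List.append_assoc,
        pvInsertBy_append _ _ _ _ (hnotbefore 0 (by omega)),
        hins_front _ (by
          intro y hy
          simp only [List.mem_append] at hy
          rcases hy with hy | hy | hy
          · exact hbefore 1 (by omega) y hy
          · exact hbefore 2 (by omega) y hy
          · exact hbefore 3 (by omega) y hy)]
    simp [happ, h, List.append_assoc]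
  · unfold pvBuckets
    rw [List.append_assoc, pvInsertBy_append _ _ _ _ (by
          intro y hy
          simp only [List.mem_append] at hy
          rcases hy with hy | hy
          · exact hnotbefore 0 (by omega) y hy
          · exact hnotbefore 1 (by omega) y hy),
        hins_front _ (by
          intro y hy
          simp only [List.mem_append] at hy
          rcases hy with hy | hy
          · exact hbefore 2 (by omega) y hy
          · exact hbefore 3 (by omega) y hy)]
    simp [happ, h, List.append_assoc]
  · unfold pvBuckets
    rw [pvInsertBy_append _ _ _ _ (by
          intro y hy
          simp only [List.mem_append] at hy
          rcases hy with (hy | hy) | hy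
          · exact hnotbefore 0 (by omega) y hy
          · exact hnotbefore 1 (by omega) y hy
          · exact hnotbefore 2 (by omega) y hy),
        hins_front _ (hbefore 3 (by omega))]
    simp [happ, h, List.append_assoc]
  · unfold pvBuckets
    rw [PySem.List.insertBy_of_forall_not_before _ _ _ (by
          intro y hy
          simp only [List.mem_append] at hy
          rcases hy with ((hy | hy) | hy) | hy
          · exact hnotbefore 0 (by omega) y hy
          · exact hnotbefore 1 (by omega) y hy
          · exact hnotbefore 2 (by omega) y hy
          · exact hnotbefore 3 (by omega) y hy)]
    simp [happ, h, List.append_assoc]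

lemma pvSorted_eq_buckets (xs : List String) :
    PySem.List.sorted xs pvRank false = pvBuckets xs := by
  rw [PySem.List.sorted_eq_foldl_insertBy]
  have : ∀ (ys ps : List String),
      ys.foldl (fun acc x => PySem.List.insertBy (fun a b => decide (pvRank a < pvRank b)) x acc)
        (pvBuckets ps) = pvBuckets (ps ++ ys) := by
    intro ys
    induction ys with
    | nil => simp
    | cons y ys ih =>
      intro ps
      simp only [List.foldl_cons]
      rw [pvInsert_buckets y ps, ih (ps ++ [y])]
      simp
  have h := this xs []
  simpa [pvBuckets] using h

-- ===== VERDICT (by name: the statement is the Claim_ definition above) =====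
theorem format_qualifications_py_spec : Claim_equal_format_qualifications_py := by
  intro qs _
  unfold Spec_format_qualifications_py format_qualifications_py format_qualifications_py_alt
  by_cases hnil : qs = []
  · simp [hnil]
  · have hfold := pvFoldA_eq qs [] [] [] []
    simp only [List.nil_append] at hfold
    simp only [hnil, if_false, hfold, pvPartsA_eq, pvSorted_eq_buckets, pvBuckets,
      List.append_assoc]
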